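-- pv_equiv track=rewrite | github.com/SkyeActsOut/TARPG | menu.py | getAllPoints
-- ===== SOURCE A (Python) =====
-- def getAllPoints (radius):
--     dia = radius*2
--     cnt = 0
--     # sq = dia * dia
--     for i in range (dia):
--         for j in range (dia):
--             if (i**2 + j**2 > radius**2):
--                 cnt+=1
--     return cnt
-- ===== SOURCE B (Python) =====
-- def getAllPoints(radius):
--     dia = radius * 2
--     if dia <= 0:
--         return 0
--     r2 = radius * radius
--     j = dia
--     inside = 0
--     for i in range(dia):
--         while j > 0 and i * i + (j - 1) * (j - 1) > r2:
--             j -= 1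
--         inside += j
--     return dia * dia - inside
-- ===== Notes on version B (the rewrite author's own statement) =====
-- stated objective: faster
-- what changed: Replaces the nested O(r^2) double loop with a single O(r) two-pointer sweep: a monotone per-row boundary pointer counts in-circle points, and the answer is dia^2 minus that total.
import Mathlib
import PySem

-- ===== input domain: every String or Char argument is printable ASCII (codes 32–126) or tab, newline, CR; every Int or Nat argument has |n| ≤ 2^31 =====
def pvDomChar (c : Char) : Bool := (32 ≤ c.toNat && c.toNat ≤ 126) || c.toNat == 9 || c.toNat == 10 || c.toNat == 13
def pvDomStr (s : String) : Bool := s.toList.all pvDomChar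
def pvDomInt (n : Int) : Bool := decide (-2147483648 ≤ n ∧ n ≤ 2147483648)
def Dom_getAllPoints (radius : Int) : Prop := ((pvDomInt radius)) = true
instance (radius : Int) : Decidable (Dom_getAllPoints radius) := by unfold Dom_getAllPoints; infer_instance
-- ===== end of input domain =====

-- B replaces A's nested O(radius^2) scan by a single O(radius) two-pointer row sweep.

-- ===== PORT A =====
def getAllPoints (radius : Int) : Int :=
  let dia := radius * 2
  (PySem.List.pyRange 0 dia 1).foldl (fun cnt i =>
    (PySem.List.pyRange 0 dia 1).foldl (fun cnt j =>
      if i ^ 2 + j ^ 2 > radius ^ 2 then cnt + 1 else cnt) cnt) 0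

-- ===== PORT B =====
-- the inner `while j > 0 and i*i+(j-1)*(j-1) > r2: j -= 1` loop of Source B
def pvShrink (r2 i : Int) (j : Int) : Int :=
  if h : 0 < j ∧ i * i + (j - 1) * (j - 1) > r2 then pvShrink r2 i (j - 1) else j
termination_by j.toNat
decreasing_by omega

def getAllPoints_alt (radius : Int) : Int :=
  let dia := radius * 2
  if dia ≤ 0 then 0
  else
    let r2 := radius * radius
    let st := (PySem.List.pyRange 0 dia 1).foldl
      (fun (st : Int × Int) i =>
        let j := pvShrink r2 i st.1
        (j, st.2 + j)) (dia, 0)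
    dia * dia - st.2

-- ===== PRECONDITION & SPEC =====
def Spec_getAllPoints (radius : Int) (out : Int) : Prop := out = getAllPoints_alt radius
instance (radius : Int) (out : Int) : Decidable (Spec_getAllPoints radius out) := by unfold Spec_getAllPoints; infer_instance

-- ===== CLAIM (what is proved, stated in full; the proofs are below) =====
def Claim_equal_getAllPoints : Prop := ∀ (radius : Int), Dom_getAllPoints radius → Spec_getAllPoints radius (getAllPoints radius)

-- ===== LEMMAS AND PROOFS =====

lemma getAllPoints_eq (radius : Int) :
    getAllPoints radius =
      (PySem.List.pyRange 0 (radius * 2) 1).foldl (fun cnt i =>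
        (PySem.List.pyRange 0 (radius * 2) 1).foldl (fun cnt j =>
          if i ^ 2 + j ^ 2 > radius ^ 2 then cnt + 1 else cnt) cnt) 0 := rfl

lemma getAllPoints_alt_eq (radius : Int) :
    getAllPoints_alt radius =
      if radius * 2 ≤ 0 then 0
      else radius * 2 * (radius * 2) -
        ((PySem.List.pyRange 0 (radius * 2) 1).foldl
          (fun (st : Int × Int) i =>
            (pvShrink (radius * radius) i st.1, st.2 + pvShrink (radius * radius) i st.1))
          (radius * 2, 0)).2 := rfl

-- counting fold = countP
lemma foldl_ite_count (p : Int → Bool) : ∀ (l : List Int) (c : Int),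
    l.foldl (fun c j => if p j then c + 1 else c) c = c + (l.countP p : Int) := by
  intro l
  induction l with
  | nil => intro c; simp
  | cons x xs ih =>
    intro c
    by_cases hx : p x <;> simp [List.foldl_cons, hx, ih]; ring

-- specification of the while-loop
lemma pvShrink_spec (r2 i : Int) : ∀ j, 0 ≤ j →
    0 ≤ pvShrink r2 i j ∧ pvShrink r2 i j ≤ j ∧
    (pvShrink r2 i j = 0 ∨ i * i + (pvShrink r2 i j - 1) * (pvShrink r2 i j - 1) ≤ r2) ∧
    (∀ j', pvShrink r2 i j ≤ j' → j' < j → i * i + j' * j' > r2) := by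
  intro j
  induction j using pvShrink.induct r2 i with
  | case1 j h ih =>
    intro hj
    rw [pvShrink, dif_pos h]
    obtain ⟨h1, h2, h3, h4⟩ := ih (by omega)
    refine ⟨h1, by omega, h3, ?_⟩
    intro j' hs hlt
    rcases lt_or_ge j' (j - 1) with hc | hc
    · exact h4 j' hs hc
    · have : j' = j - 1 := by omega
      subst this; exact h.2
  | case2 j h =>
    intro hj
    rw [pvShrink, dif_neg h]
    refine ⟨hj, le_refl _, ?_, fun j' h1 h2 => absurd (lt_of_le_of_lt h1 h2) (lt_irrefl _)⟩
    by_cases h0 : j = 0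
    · exact Or.inl h0
    · right; by_contra hgt; exact h ⟨by omega, by omega⟩

-- the per-row count of A equals dia - s where s is B's pointer after the while loop,
-- under the invariant that everything at or above the incoming pointer is outside the circle
lemma row_count (radius dia i j : Int) (hdia : dia = radius * 2)
    (hj0 : 0 ≤ j) (hjd : j ≤ dia)
    (hinv : ∀ j', j ≤ j' → j' < dia → i * i + j' * j' > radius * radius) :
    ((PySem.List.pyRange 0 dia 1).countP
        (fun jj => decide (i ^ 2 + jj ^ 2 > radius ^ 2)) : Int)
      = dia - pvShrink (radius * radius) i j := by
  obtain ⟨hs0, hsj, hb, hout⟩ := pvShrink_spec (radius * radius) i j hj0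
  set s := pvShrink (radius * radius) i j with hs
  have hsd : s ≤ dia := le_trans hsj hjd
  -- split the range at s
  rw [PySem.List.pyRange_one_append 0 s dia hs0 hsd, List.countP_append]
  have hlow : (PySem.List.pyRange 0 s 1).countP
      (fun jj => decide (i ^ 2 + jj ^ 2 > radius ^ 2)) = 0 := by
    rw [List.countP_eq_zero]
    intro jj hjj
    rw [PySem.List.mem_pyRange_one] at hjj
    have hspos : 0 < s := by omega
    have hle : i * i + (s - 1) * (s - 1) ≤ radius * radius := by
      rcases hb with h | h
      · omega
      · exact h
    have hsq : jj * jj ≤ (s - 1) * (s - 1) :=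
      mul_self_le_mul_self (by omega) (by omega)
    simp only [decide_eq_true_eq, not_lt]
    nlinarith
  have hhigh : (PySem.List.pyRange s dia 1).countP
      (fun jj => decide (i ^ 2 + jj ^ 2 > radius ^ 2)) = (dia - s).toNat := by
    rw [List.countP_eq_length.mpr, PySem.List.length_pyRange_one]
    intro jj hjj
    rw [PySem.List.mem_pyRange_one] at hjj
    have : i * i + jj * jj > radius * radius := by
      rcases lt_or_ge jj j with hc | hc
      · exact hout jj hjj.1 hc
      · exact hinv jj hc hjj.2
    simp only [decide_eq_true_eq]
    nlinarith
  rw [hlow, hhigh]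
  omega

-- combined loop invariant: A's outer fold from c plus B's running `inside` is constant
lemma main_loop (radius dia : Int) (hdia : dia = radius * 2) :
    ∀ (n : Nat) (a j c ins : Int), 0 ≤ a → a + (n : Int) = dia →
      0 ≤ j → j ≤ dia →
      (∀ j', j ≤ j' → j' < dia → a * a + j' * j' > radius * radius) →
      (PySem.List.pyRange a dia 1).foldl (fun cnt i =>
          (PySem.List.pyRange 0 dia 1).foldl (fun cnt j =>
            if i ^ 2 + j ^ 2 > radius ^ 2 then cnt + 1 else cnt) cnt) c
        + ((PySem.List.pyRange a dia 1).foldl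
            (fun (st : Int × Int) i =>
              (pvShrink (radius * radius) i st.1, st.2 + pvShrink (radius * radius) i st.1))
            (j, ins)).2
        = c + ins + (n : Int) * dia := by
  intro n
  induction n with
  | zero =>
    intro a j c ins ha hn hj0 hjd hinv
    have : dia ≤ a := by omega
    rw [PySem.List.pyRange_one_eq_nil this]
    simp
  | succ m ih =>
    intro a j c ins ha hn hj0 hjd hinv
    have hlt : a < dia := by push_cast at hn ⊢; omega
    rw [PySem.List.pyRange_one_cons hlt]
    simp only [List.foldl_cons]
    obtain ⟨hs0, hsj, hb, hout⟩ := pvShrink_spec (radius * radius) a j hj0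
    set s := pvShrink (radius * radius) a j with hs
    have hrow := row_count radius dia a j hdia hj0 hjd hinv
    have hic := foldl_ite_count (fun jj => decide (a ^ 2 + jj ^ 2 > radius ^ 2))
      (PySem.List.pyRange 0 dia 1) c
    have hinv' : ∀ j', s ≤ j' → j' < dia → (a + 1) * (a + 1) + j' * j' > radius * radius := by
      intro j' h1 h2
      have : a * a + j' * j' > radius * radius := by
        rcases lt_or_ge j' j with hc | hc
        · exact hout j' h1 hc
        · exact hinv j' hc h2
      nlinarith
    have := ih (a + 1) s
      (c + ((PySem.List.pyRange 0 dia 1).countP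
        (fun jj => decide (a ^ 2 + jj ^ 2 > radius ^ 2)) : Int))
      (ins + s) (by omega) (by push_cast at hn ⊢; omega) hs0 (le_trans hsj hjd) hinv'
    simp only [decide_eq_true_eq] at hic this ⊢
    rw [hic, this]
    push_cast
    rw [hrow]
    ring

-- ===== VERDICT (by name: the statement is the Claim_ definition above) =====
theorem getAllPoints_spec : Claim_equal_getAllPoints := by
  intro radius _
  show getAllPoints radius = getAllPoints_alt radius
  rw [getAllPoints_eq, getAllPoints_alt_eq]
  by_cases hneg : radius * 2 ≤ 0
  · rw [if_pos hneg, PySem.List.pyRange_one_eq_nil hneg]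
    simp
  · rw [if_neg hneg]
    rw [not_le] at hneg
    have hdia : 0 ≤ radius * 2 := le_of_lt hneg
    have hmain := main_loop radius (radius * 2) rfl (radius * 2).toNat 0 (radius * 2) 0 0
      (le_refl 0) (by omega) hdia (le_refl _) (fun j' h1 h2 => absurd (lt_of_le_of_lt h1 h2) (lt_irrefl _))
    simp only [zero_add] at hmain
    have hcast : ((radius * 2).toNat : Int) = radius * 2 := by omega
    rw [hcast] at hmain
    omega
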